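-- pv_equiv track=rewrite | github.com/sarcom-sar/cryptopals-ex | crypals/set1.py | _score_xors
-- ===== SOURCE A (Python) =====
-- def _score_xors(output_string: str) -> int:
--     score_table: dict[str, int] = {"e": 11, "m": 3, "a": 8, "h": 3, "r": 7,
--                                    "g": 2, "i": 7, "b": 2, "o": 7, "f": 1,
--                                    "t": 6, "y": 1, "n": 6, "w": 1, "s": 5,
--                                    "k": 1, "l": 5, "v": 1, "c": 4, "u": 3,
--                                    "d": 3, "p": 3}
--
--     score: int = sum([score_table[x.lower()] if x in score_table else 0
--                       for x in output_string])
--     return score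
-- ===== SOURCE B (Python) =====
-- def _score_xors(output_string: str) -> int:
--     # Weights for 'a'..'z'; letters absent from A's table (j, q, x, z) weigh 0,
--     # which yields the same score as A's membership test failing on them.
--     weights = [8, 2, 4, 3, 11, 1, 2, 3, 7, 0, 1, 5, 3,
--                6, 7, 3, 0, 7, 5, 6, 3, 1, 1, 0, 1, 0]
--     counts = [0] * 26
--     for ch in output_string:
--         i = ord(ch) - 97
--         if 0 <= i < 26:
--             counts[i] += 1
--     return sum(w * c for w, c in zip(weights, counts))
-- ===== Notes on version B (the rewrite author's own statement) =====
-- stated objective: alternative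
-- what changed: B replaces A's per-position dict lookup by a 26-slot letter histogram built in one pass, then a dot product of the count array with a fixed weight array indexed by character code (letters outside A's table get weight 0).
import Mathlib
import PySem

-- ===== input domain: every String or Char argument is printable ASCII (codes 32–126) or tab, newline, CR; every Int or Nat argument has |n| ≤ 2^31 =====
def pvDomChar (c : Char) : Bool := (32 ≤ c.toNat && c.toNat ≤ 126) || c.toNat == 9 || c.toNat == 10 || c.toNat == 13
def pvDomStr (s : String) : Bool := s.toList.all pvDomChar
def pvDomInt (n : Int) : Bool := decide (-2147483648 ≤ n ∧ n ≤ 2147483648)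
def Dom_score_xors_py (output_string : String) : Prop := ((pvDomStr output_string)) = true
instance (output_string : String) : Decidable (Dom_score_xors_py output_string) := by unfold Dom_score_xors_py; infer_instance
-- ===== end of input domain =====

-- B scores by building a 26-slot lowercase-letter histogram in one pass and dotting it with a fixed
-- weight array indexed by character code, instead of A's per-position dict membership test + lookup;
-- an alternative of the same cost, not claimed faster.

-- ===== PORT A =====
-- Python dict keys are 1-character strings and are only ever compared with single characters of the
-- input, so the table is ported keyed by Char (exact on this use).
def pvEntriesA : List (Char × Int) :=
  [('e',11),('m',3),('a',8),('h',3),('r',7),('g',2),('i',7),('b',2),('o',7),('f',1),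
   ('t',6),('y',1),('n',6),('w',1),('s',5),('k',1),('l',5),('v',1),('c',4),('u',3),
   ('d',3),('p',3)]

-- x.lower() on a 1-character string is PySem.Chars.lowerChar (exact on ASCII chars);
-- score_table[x.lower()] is guarded by the membership test, so .getD 0 is never the KeyError case.
def score_xors_py (output_string : String) : Int :=
  let score_table : PySem.Dict Char Int := PySem.Dict.ofList pvEntriesA
  (output_string.toList.map (fun x =>
      if (score_table.get? x).isSome then
        (score_table.get? (PySem.Chars.lowerChar x)).getD 0
      else 0)).sum

-- ===== PORT B =====
-- weights for 'a'..'z' (letters absent from the table weigh 0)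
def pvWeights : List Int :=
  [8, 2, 4, 3, 11, 1, 2, 3, 7, 0, 1, 5, 3, 6, 7, 3, 0, 7, 5, 6, 3, 1, 1, 0, 1, 0]

-- counts[i] += 1 (with 0 ≤ i < 26 guaranteed by the guard) is List.set at i of the current entry
-- plus one; [0]*26 is List.replicate; sum over zip(weights, counts) is the final dot product.
def score_xors_py_alt (output_string : String) : Int :=
  let counts : List Int := output_string.toList.foldl
    (fun counts ch =>
      let i : Int := (ch.toNat : Int) - 97
      if 0 ≤ i ∧ i < 26 then counts.set i.toNat (counts.getD i.toNat 0 + 1) else counts)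
    (List.replicate 26 (0 : Int))
  ((pvWeights.zip counts).map (fun wc => wc.1 * wc.2)).sum

-- ===== PRECONDITION & SPEC =====
def Spec_score_xors_py (output_string : String) (out : Int) : Prop := out = score_xors_py_alt output_string
instance (output_string : String) (out : Int) : Decidable (Spec_score_xors_py output_string out) := by unfold Spec_score_xors_py; infer_instance

-- ===== CLAIM (what is proved, stated in full; the proofs are below) =====
def Claim_equal_score_xors_py : Prop := ∀ (output_string : String), Dom_score_xors_py output_string → Spec_score_xors_py output_string (score_xors_py output_string)

-- ===== LEMMAS AND PROOFS =====

-- A's per-character score, as a function.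
def pvW (c : Char) : Int :=
  let score_table : PySem.Dict Char Int := PySem.Dict.ofList pvEntriesA
  if (score_table.get? c).isSome then
    (score_table.get? (PySem.Chars.lowerChar c)).getD 0
  else 0

-- dot product used by B's final sum
def pvDot (w l : List Int) : Int := ((w.zip l).map (fun wc => wc.1 * wc.2)).sum

-- B's loop step
def pvStep (counts : List Int) (ch : Char) : List Int :=
  if 0 ≤ (ch.toNat : Int) - 97 ∧ (ch.toNat : Int) - 97 < 26 then
    counts.set ((ch.toNat : Int) - 97).toNat (counts.getD ((ch.toNat : Int) - 97).toNat 0 + 1)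
  else counts

-- A's weight of a character, expressed through B's weight array.
theorem pvW_eq (c : Char) :
    pvW c = if 97 ≤ c.toNat ∧ c.toNat ≤ 122 then pvWeights.getD (c.toNat - 97) 0 else 0 := by
  by_cases h : 97 ≤ c.toNat ∧ c.toNat ≤ 122
  · rw [if_pos h]
    have hofNat : Char.ofNat c.toNat = c := Char.ofNat_toNat c
    suffices hs : ∀ n : Nat, 97 ≤ n → n ≤ 122 →
        pvW (Char.ofNat n) = pvWeights.getD (n - 97) 0 by
      conv_lhs => rw [← hofNat]
      exact hs c.toNat h.1 h.2
    intro n h1 h2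
    interval_cases n <;> decide
  · rw [if_neg h]
    have hfind : List.find? (fun p => p.1 == c) (PySem.Dict.ofList pvEntriesA).items = none := by
      have hI : (PySem.Dict.ofList pvEntriesA).items = pvEntriesA := by decide
      rw [hI, List.find?_eq_none]
      intro x hx hpx
      have he : x.1 = c := by simpa using hpx
      apply h
      fin_cases hx <;> (subst he; decide)
    simp only [pvW, PySem.Dict.get?, hfind, Option.map_none, Option.isSome_none,
      Bool.false_eq_true, if_false]

-- incrementing one slot shifts the dot product by that slot's weight
theorem pvDot_set (w l : List Int) (j : Nat) (hw : j < w.length) (hl : j < l.length) :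
    pvDot w (l.set j (l.getD j 0 + 1)) = pvDot w l + w.getD j 0 := by
  induction j generalizing w l with
  | zero =>
      match w, l with
      | a :: w', b :: l' => simp [pvDot]; ring
  | succ j ih =>
      match w, l with
      | a :: w', b :: l' =>
          have hw' : j < w'.length := by simpa using hw
          have hl' : j < l'.length := by simpa using hl
          have := ih w' l' hw' hl'
          simp only [pvDot, List.set, List.getD, List.getElem?_cons_succ, List.zip_cons_cons,
            List.map_cons, List.sum_cons] at this ⊢
          omega

-- one loop step shifts the dot product by A's weight of the character
theorem pvDot_step (counts : List Int) (c : Char) (h : counts.length = 26) :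
    pvDot pvWeights (pvStep counts c) = pvDot pvWeights counts + pvW c := by
  unfold pvStep
  by_cases hc : 0 ≤ (c.toNat : Int) - 97 ∧ (c.toNat : Int) - 97 < 26
  · rw [if_pos hc]
    have hj : ((c.toNat : Int) - 97).toNat = c.toNat - 97 := by omega
    rw [hj, pvDot_set pvWeights counts (c.toNat - 97) (by simp [pvWeights]; omega) (by omega),
      pvW_eq]
    rw [if_pos (by omega)]
  · rw [if_neg hc, pvW_eq, if_neg (by omega)]
    omega

theorem pvStep_length (counts : List Int) (c : Char) (h : counts.length = 26) :
    (pvStep counts c).length = 26 := by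
  unfold pvStep; split <;> simp [h]

-- loop invariant: the dot product of the running histogram accumulates A's per-character scores
theorem pvMain (cs : List Char) (counts : List Int) (h : counts.length = 26) :
    pvDot pvWeights (cs.foldl pvStep counts) = pvDot pvWeights counts + (cs.map pvW).sum := by
  induction cs generalizing counts with
  | nil => simp
  | cons c cs ih =>
      simp only [List.foldl_cons, List.map_cons, List.sum_cons]
      rw [ih (pvStep counts c) (pvStep_length counts c h), pvDot_step counts c h]
      ring

-- ===== VERDICT (by name: the statement is the Claim_ definition above) =====
theorem score_xors_py_spec : Claim_equal_score_xors_py := by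
  intro s _
  show score_xors_py s = score_xors_py_alt s
  have hB : score_xors_py_alt s = pvDot pvWeights (s.toList.foldl pvStep (List.replicate 26 0)) := rfl
  have hA : score_xors_py s = (s.toList.map pvW).sum := rfl
  rw [hA, hB, pvMain s.toList _ (by simp)]
  simp [pvDot, pvWeights]
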